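-- pv_equiv track=rewrite | github.com/JohnsonLM/CONFORM | figures.py | _split_title
-- ===== SOURCE A (Python) =====
-- def _split_title(text, max_chars=34):
--     if len(text) <= max_chars:
--         return [text]
--
--     parts = text.split()
--     lines = []
--     current = ""
--     for part in parts:
--         candidate = part if not current else f"{current} {part}"
--         if len(candidate) <= max_chars:
--             current = candidate
--         else:
--             if current:
--                 lines.append(current)
--             current = part
--     if current:
--         lines.append(current)
--
--     return lines[:2]
-- ===== SOURCE B (Python) =====
-- def _split_title(text, max_chars=34):
--     if len(text) <= max_chars:
--         return [text]
--     words = text.split()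
--     lines = []
--     i = 0
--     while i < len(words) and len(lines) < 2:
--         line = words[i]
--         i += 1
--         while i < len(words) and len(line) + 1 + len(words[i]) <= max_chars:
--             line = line + " " + words[i]
--             i += 1
--         lines.append(line)
--     return lines
-- ===== Notes on version B (the rewrite author's own statement) =====
-- stated objective: alternative
-- what changed: Replaces the single flat fold with deferred overflow-append and a final lines[:2] slice by a nested-loop packer that builds each of at most two lines directly (seed with the next word, greedily extend while it fits) and stops as soon as two lines exist, never materialising lines beyond the second.
import Mathlib
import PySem

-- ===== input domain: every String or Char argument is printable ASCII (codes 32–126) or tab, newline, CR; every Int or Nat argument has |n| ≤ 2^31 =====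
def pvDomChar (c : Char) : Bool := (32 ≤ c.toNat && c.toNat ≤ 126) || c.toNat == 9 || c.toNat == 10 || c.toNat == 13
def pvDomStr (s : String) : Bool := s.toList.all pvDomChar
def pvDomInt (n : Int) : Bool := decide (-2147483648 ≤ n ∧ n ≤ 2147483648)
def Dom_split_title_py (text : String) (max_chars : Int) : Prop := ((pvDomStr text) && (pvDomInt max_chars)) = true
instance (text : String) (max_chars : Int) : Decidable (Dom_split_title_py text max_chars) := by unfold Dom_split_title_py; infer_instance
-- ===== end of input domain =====

-- B replaces A's flat fold (flush-on-overflow, then lines[:2]) by a nested packer that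
-- builds each of at most two lines directly and stops early; alternative decomposition, same cost.

-- ===== PORT A =====
-- one loop iteration of A: state = (lines, current), over List Char (Lean's String ops are kernel-opaque)
def pvAStep (mc : Int) (st : List (List Char) × List Char) (part : List Char) :
    List (List Char) × List Char :=
  let lines := st.1
  let current := st.2
  let candidate := if current.isEmpty then part else current ++ ' ' :: part
  if PySem.Chars.len candidate ≤ mc then (lines, candidate)
  else ((if current.isEmpty then lines else lines ++ [current]), part)

def split_title_py (text : String) (max_chars : Int) : List String :=
  if PySem.Str.len text ≤ max_chars then [text]
  else
    let parts := PySem.Chars.split₀ text.toList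
    let st := parts.foldl (pvAStep max_chars) ([], [])
    let lines := if st.2.isEmpty then st.1 else st.1 ++ [st.2]
    (PySem.List.slice lines none (some 2)).map String.ofList

-- ===== PORT B =====
-- inner while loop of B: greedily extend `line` with the next words while they fit
def pvPack (mc : Int) : List Char → List (List Char) → List Char × List (List Char)
  | line, [] => (line, [])
  | line, w :: rest =>
      if PySem.Chars.len line + 1 + PySem.Chars.len w ≤ mc then
        pvPack mc (line ++ ' ' :: w) rest
      else (line, w :: rest)

-- outer while loop of B: at most k more lines
def pvPackLines (mc : Int) : Nat → List (List Char) → List (List Char)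
  | 0, _ => []
  | _ + 1, [] => []
  | k + 1, w :: rest =>
      let p := pvPack mc w rest
      p.1 :: pvPackLines mc k p.2

def split_title_py_alt (text : String) (max_chars : Int) : List String :=
  if PySem.Str.len text ≤ max_chars then [text]
  else (pvPackLines max_chars 2 (PySem.Chars.split₀ text.toList)).map String.ofList

-- ===== PRECONDITION & SPEC =====
def Spec_split_title_py (text : String) (max_chars : Int) (out : List String) : Prop := out = split_title_py_alt text max_chars
instance (text : String) (max_chars : Int) (out : List String) : Decidable (Spec_split_title_py text max_chars out) := by unfold Spec_split_title_py; infer_instance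

-- ===== CLAIM (what is proved, stated in full; the proofs are below) =====
def Claim_equal_split_title_py : Prop := ∀ (text : String) (max_chars : Int), Dom_split_title_py text max_chars → Spec_split_title_py text max_chars (split_title_py text max_chars)

-- ===== LEMMAS AND PROOFS =====

-- every word produced by Python's str.split() is nonempty
theorem pvSplit₀_go_ne_nil (s cur : List Char) (acc : List (List Char))
    (hacc : ∀ w ∈ acc, w ≠ []) :
    ∀ w ∈ PySem.Chars.split₀.go s cur acc, w ≠ [] := by
  induction s generalizing cur acc with
  | nil =>
      intro w hw
      unfold PySem.Chars.split₀.go at hw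
      split at hw
      · exact hacc w (List.mem_reverse.mp hw)
      · rcases List.mem_cons.mp (List.mem_reverse.mp hw) with h | h
        · subst h
          simp_all [List.isEmpty_iff]
        · exact hacc w h
  | cons c rest ih =>
      intro w hw
      unfold PySem.Chars.split₀.go at hw
      split at hw
      · split at hw
        · exact ih [] acc hacc w hw
        · refine ih [] (cur.reverse :: acc) ?_ w hw
          intro v hv
          rcases List.mem_cons.mp hv with h | h
          · subst h; simp_all [List.isEmpty_iff]
          · exact hacc v h
      · exact ih (c :: cur) acc hacc w hw

theorem pvSplit₀_ne_nil (s : List Char) : ∀ w ∈ PySem.Chars.split₀ s, w ≠ [] := by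
  unfold PySem.Chars.split₀
  exact pvSplit₀_go_ne_nil s [] [] (by intro w hw; cases hw)

theorem pvPackLines_nil (mc : Int) (k : Nat) : pvPackLines mc k [] = [] := by
  cases k <;> simp [pvPackLines]

-- the lines accumulator of A's fold is append-only
theorem pvFoldA_append (mc : Int) (ws : List (List Char)) (L : List (List Char)) (c : List Char) :
    List.foldl (pvAStep mc) (L, c) ws =
      (L ++ (List.foldl (pvAStep mc) ([], c) ws).1, (List.foldl (pvAStep mc) ([], c) ws).2) := by
  induction ws generalizing L c with
  | nil => simp
  | cons w rest ih =>
      have hstep : pvAStep mc (L, c) w =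
          (L ++ (pvAStep mc ([], c) w).1, (pvAStep mc ([], c) w).2) := by
        simp only [pvAStep]
        split_ifs <;> simp
      simp only [List.foldl_cons, hstep]
      rw [ih]
      conv_rhs => rw [ih]
      rcases h : pvAStep mc ([], c) w with ⟨l1, c1⟩
      simp [List.append_assoc]

-- main invariant: taking k lines of A's flushed fold output equals B's k-line packer
theorem pvMain (mc : Int) (ws : List (List Char)) :
    ∀ (c : List Char) (k : Nat), c ≠ [] → (∀ w ∈ ws, w ≠ []) →
      List.take k
        (let st := List.foldl (pvAStep mc) ([], c) ws
         if st.2.isEmpty then st.1 else st.1 ++ [st.2]) =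
      pvPackLines mc k (c :: ws) := by
  induction ws with
  | nil =>
      intro c k hc _
      simp only [List.foldl_nil]
      rw [if_neg (by simpa [List.isEmpty_iff] using hc)]
      cases k with
      | zero => simp [pvPackLines]
      | succ k => simp [pvPackLines, pvPack, pvPackLines_nil]
  | cons w rest ih =>
      intro c k hc hws
      have hw : w ≠ [] := hws w (by simp)
      have hrest : ∀ v ∈ rest, v ≠ [] := fun v hv => hws v (by simp [hv])
      simp only [List.foldl_cons]
      have hcne : c.isEmpty = false := by simpa [List.isEmpty_iff] using hc
      by_cases hfit : (c.length : Int) + 1 + w.length ≤ mc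
      · -- the word fits: A extends current, B extends line; both recurse on rest
        have hfitA : (c.length : Int) + (w.length + 1) ≤ mc := by omega
        have hstep : pvAStep mc ([], c) w = ([], c ++ ' ' :: w) := by
          simp [pvAStep, hcne, hfitA]
        rw [hstep]
        have hcand : (c ++ ' ' :: w) ≠ [] := by simp
        rw [ih (c ++ ' ' :: w) k hcand hrest]
        cases k with
        | zero => simp [pvPackLines]
        | succ k => simp [pvPackLines, pvPack, hfit]
      · -- overflow: A flushes c, B closes the line at c
        have hfitA : ¬ (c.length : Int) + (w.length + 1) ≤ mc := by omega
        have hstep : pvAStep mc ([], c) w = ([c], w) := by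
          simp [pvAStep, hcne, hfitA]
        rw [hstep]
        rw [pvFoldA_append mc rest [c] w]
        cases k with
        | zero => simp [pvPackLines]
        | succ k =>
            have := ih w k hw hrest
            simp only at this ⊢
            rw [show ∀ (X : List (List Char)) (cur : List Char),
                  (if cur.isEmpty then [c] ++ X else [c] ++ X ++ [cur]) =
                    c :: (if cur.isEmpty then X else X ++ [cur]) from by
              intro X cur; split_ifs <;> simp]
            rw [List.take_succ_cons, this]
            simp [pvPackLines, pvPack, hfit]

-- first word seeds `current` in A no matter whether it fits
theorem pvFirstStep (mc : Int) (w : List Char) : pvAStep mc ([], []) w = ([], w) := by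
  simp only [pvAStep]
  split_ifs <;> simp_all

-- ===== VERDICT (by name: the statement is the Claim_ definition above) =====
theorem split_title_py_spec : Claim_equal_split_title_py := by
  intro text mc _
  unfold Spec_split_title_py split_title_py split_title_py_alt
  by_cases hshort : PySem.Str.len text ≤ mc
  · rw [if_pos hshort, if_pos hshort]
  · rw [if_neg hshort, if_neg hshort]
    simp only [PySem.List.slice_to _ (by norm_num : (0:Int) ≤ 2)]
    rcases hp : PySem.Chars.split₀ text.toList with _ | ⟨w, rest⟩
    · simp [pvPackLines]
    · have hne : ∀ v ∈ w :: rest, v ≠ [] := by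
        rw [← hp]; exact pvSplit₀_ne_nil text.toList
      have hw : w ≠ [] := hne w (by simp)
      have hrest : ∀ v ∈ rest, v ≠ [] := fun v hv => hne v (by simp [hv])
      simp only [List.foldl_cons, pvFirstStep]
      exact congrArg (List.map String.ofList) (pvMain mc rest w 2 hw hrest)
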